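-- pv_equiv track=rewrite | github.com/DaY1zz/AMC | predict_load.py | conj_seq_lst
-- ===== SOURCE A (Python) =====
-- def conj_seq_lst(lst, count_invoke=False, threshold=1):
--     seq_lenth_lst = []
--     pre_pos = -1
--     for i, e in enumerate(lst):
--         if not (bool(e) ^ count_invoke): #非异或 判断两个条件是否相等 (求连续正且当前元素为正 或 求连续负且当前元素为负)
--             if pre_pos < 0:     #连续序列中的第一个元素位置
--                 pre_pos = i
--             if i == len(lst)-1 and i+1-pre_pos >= threshold:    #末尾元素进行处理
--                 seq_lenth_lst.append(i+1-pre_pos)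
--         else:   # 连续序列中断
--             if pre_pos>=0 and i-pre_pos >= threshold:
--                 seq_lenth_lst.append(i-pre_pos)
--             pre_pos = -1
--     return seq_lenth_lst
-- ===== SOURCE B (Python) =====
-- def conj_seq_lst(lst, count_invoke=False, threshold=1):
--     out = []
--     i, n = 0, len(lst)
--     while i < n:
--         if not (bool(lst[i]) ^ count_invoke):
--             j = i
--             while j < n and not (bool(lst[j]) ^ count_invoke):
--                 j += 1
--             if j - i >= threshold:
--                 out.append(j - i)
--             i = j
--         else:
--             i += 1
--     return out
-- ===== Notes on version B (the rewrite author's own statement) =====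
-- stated objective: simpler
-- what changed: Replaced A's enumerate loop with a pre_pos sentinel and a special last-element branch by a two-pointer run scan: jump to the end of each matching run, append its length if it meets the threshold, no sentinel or end-of-list special case.
import Mathlib
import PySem

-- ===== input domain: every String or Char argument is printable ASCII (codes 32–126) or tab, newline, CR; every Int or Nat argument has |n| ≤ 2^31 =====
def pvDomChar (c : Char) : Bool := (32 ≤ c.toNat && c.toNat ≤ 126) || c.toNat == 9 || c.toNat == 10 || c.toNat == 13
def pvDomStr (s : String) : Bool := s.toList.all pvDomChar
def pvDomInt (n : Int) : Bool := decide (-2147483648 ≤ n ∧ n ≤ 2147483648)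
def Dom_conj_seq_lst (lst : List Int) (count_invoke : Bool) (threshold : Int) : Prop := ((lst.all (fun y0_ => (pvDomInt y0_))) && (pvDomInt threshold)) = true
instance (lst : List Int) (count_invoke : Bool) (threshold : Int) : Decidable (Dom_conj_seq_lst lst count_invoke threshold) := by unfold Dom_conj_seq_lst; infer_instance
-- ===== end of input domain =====

-- B replaces A's sentinel (pre_pos) loop and its special last-element branch by a two-pointer
-- run scan with the same predicate; equal return value on all inputs (no mutation in either).
-- ===== PORT A =====
-- A's for-loop over enumerate(lst): state (seq_lenth_lst, pre_pos), index i carried explicitly, n = len(lst)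
def aGo (n : Int) (ci : Bool) (t : Int) : List Int → Int → List Int → Int → List Int
  | [], _i, seq, _pre => seq
  | e :: rest, i, seq, pre =>
    if !((decide (e ≠ 0)).xor ci) then
      let pre' := if pre < 0 then i else pre
      let seq' := if i = n - 1 ∧ t ≤ i + 1 - pre' then seq ++ [i + 1 - pre'] else seq
      aGo n ci t rest (i + 1) seq' pre'
    else
      let seq' := if 0 ≤ pre ∧ t ≤ i - pre then seq ++ [i - pre] else seq
      aGo n ci t rest (i + 1) seq' (-1)

-- ===== PORT B =====
-- B's outer while-loop: on a match the inner while counts the run (takeWhile) and i jumps past it (dropWhile)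
def altGo (p : Int → Bool) (t : Int) : List Int → List Int
  | [] => []
  | x :: xs =>
    if p x then
      let k : Int := 1 + ((xs.takeWhile p).length : Int)
      (if t ≤ k then [k] else []) ++ altGo p t (xs.dropWhile p)
    else altGo p t xs
termination_by l => l.length
decreasing_by
  · simpa using Nat.lt_succ_of_le (List.length_dropWhile_le p xs)
  · simp


def conj_seq_lst (lst : List Int) (count_invoke : Bool) (threshold : Int) : List Int :=
  aGo (lst.length : Int) count_invoke threshold lst 0 [] (-1)

def conj_seq_lst_alt (lst : List Int) (count_invoke : Bool) (threshold : Int) : List Int :=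
  altGo (fun e => !((decide (e ≠ 0)).xor count_invoke)) threshold lst

-- ===== PRECONDITION & SPEC =====
def Spec_conj_seq_lst (lst : List Int) (count_invoke : Bool) (threshold : Int) (out : List Int) : Prop := out = conj_seq_lst_alt lst count_invoke threshold
instance (lst : List Int) (count_invoke : Bool) (threshold : Int) (out : List Int) : Decidable (Spec_conj_seq_lst lst count_invoke threshold out) := by unfold Spec_conj_seq_lst; infer_instance

-- ===== CLAIM (what is proved, stated in full; the proofs are below) =====
def Claim_equal_conj_seq_lst : Prop := ∀ (lst : List Int) (count_invoke : Bool) (threshold : Int), Dom_conj_seq_lst lst count_invoke threshold → Spec_conj_seq_lst lst count_invoke threshold (conj_seq_lst lst count_invoke threshold)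

-- ===== LEMMAS AND PROOFS =====
theorem aGo_nil (n : Int) (ci : Bool) (t i : Int) (seq : List Int) (pre : Int) :
    aGo n ci t [] i seq pre = seq := rfl

theorem aGo_cons (n : Int) (ci : Bool) (t : Int) (e : Int) (rest : List Int) (i : Int)
    (seq : List Int) (pre : Int) :
    aGo n ci t (e :: rest) i seq pre =
      if !((decide (e ≠ 0)).xor ci) then
        aGo n ci t rest (i + 1)
          (if i = n - 1 ∧ t ≤ i + 1 - (if pre < 0 then i else pre) then
              seq ++ [i + 1 - (if pre < 0 then i else pre)] else seq)
          (if pre < 0 then i else pre)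
      else
        aGo n ci t rest (i + 1)
          (if 0 ≤ pre ∧ t ≤ i - pre then seq ++ [i - pre] else seq) (-1) := rfl

theorem altGo_nil (p : Int → Bool) (t : Int) : altGo p t [] = [] := by rw [altGo]

theorem altGo_cons (p : Int → Bool) (t : Int) (x : Int) (xs : List Int) :
    altGo p t (x :: xs) =
      if p x then
        (if t ≤ 1 + ((xs.takeWhile p).length : Int) then [1 + ((xs.takeWhile p).length : Int)] else [])
          ++ altGo p t (xs.dropWhile p)
      else altGo p t xs := by rw [altGo]

theorem aGo_eq_altGo (ci : Bool) (t n : Int) (l : List Int) :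
    ∀ (i : Int) (seq : List Int), 0 ≤ i → i = n - (l.length : Int) →
    (aGo n ci t l i seq (-1) = seq ++ altGo (fun e => !((decide (e ≠ 0)).xor ci)) t l)
    ∧ (∀ s : Int, 0 ≤ s → s ≤ i → l ≠ [] →
        aGo n ci t l i seq s =
          (if t ≤ i + ((l.takeWhile (fun e => !((decide (e ≠ 0)).xor ci))).length : Int) - s then
              seq ++ [i + ((l.takeWhile (fun e => !((decide (e ≠ 0)).xor ci))).length : Int) - s]
            else seq)
          ++ altGo (fun e => !((decide (e ≠ 0)).xor ci)) t
              (l.dropWhile (fun e => !((decide (e ≠ 0)).xor ci)))) := by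
  induction l with
  | nil =>
    intro i seq _ _
    exact ⟨by simp [aGo_nil, altGo_nil], fun s _ _ h => absurd rfl h⟩
  | cons x xs ih =>
    intro i seq hi hsum
    have hlen : i + ((xs.length : Int) + 1) = n := by
      simp at hsum; omega
    by_cases hx : (!((decide (x ≠ 0)).xor ci)) = true
    · -- x matches
      cases xs with
      | nil =>
        have hn1 : i = n - 1 := by simp at hlen; omega
        refine ⟨?_, fun s hs0 hsi _ => ?_⟩
        · rw [aGo_cons, if_pos hx, aGo_nil, altGo_cons, if_pos hx]
          rw [show (if (-1:Int) < 0 then i else -1) = i by norm_num]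
          simp only [List.takeWhile_nil, List.dropWhile_nil, altGo_nil,
            List.length_nil, Nat.cast_zero, add_zero, List.append_nil]
          have e1 : i + 1 - i = (1:Int) := by omega
          rw [e1]
          by_cases ht : t ≤ (1:Int)
          · rw [if_pos ⟨hn1, ht⟩, if_pos ht]
          · rw [if_neg (fun h => ht h.2), if_neg ht, List.append_nil]
        · rw [aGo_cons, if_pos hx, aGo_nil]
          rw [show (if s < 0 then i else s) = s from if_neg (by omega)]
          rw [List.takeWhile_cons_of_pos (p := fun e => !((decide (e ≠ 0)).xor ci)) (l := []) hx,
            List.dropWhile_cons_of_pos (p := fun e => !((decide (e ≠ 0)).xor ci)) (l := []) hx]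
          simp only [List.takeWhile_nil, List.dropWhile_nil, altGo_nil,
            List.length_cons, List.length_nil,
            Nat.cast_one, zero_add, List.append_nil]
          by_cases ht : t ≤ i + 1 - s
          · rw [if_pos ⟨hn1, ht⟩, if_pos ht]
          · rw [if_neg (fun h => ht h.2), if_neg ht]
      | cons y ys =>
        have hn1 : i ≠ n - 1 := by simp at hlen; omega
        refine ⟨?_, fun s hs0 hsi _ => ?_⟩
        · rw [aGo_cons, if_pos hx]
          rw [show (if (-1:Int) < 0 then i else -1) = i by norm_num]
          rw [if_neg (show ¬(i = n - 1 ∧ t ≤ i + 1 - i) from fun h => hn1 h.1)]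
          rw [(ih (i + 1) seq (by omega) (by omega)).2
            i hi (by omega) (by simp)]
          rw [altGo_cons, if_pos hx]
          have e1 : i + 1 + (((y :: ys).takeWhile fun e => !((decide (e ≠ 0)).xor ci)).length : Int) - i
              = 1 + (((y :: ys).takeWhile fun e => !((decide (e ≠ 0)).xor ci)).length : Int) := by omega
          rw [e1]
          split_ifs <;> simp_all
        · rw [aGo_cons, if_pos hx]
          rw [show (if s < 0 then i else s) = s from if_neg (by omega)]
          rw [if_neg (show ¬(i = n - 1 ∧ t ≤ i + 1 - s) from fun h => hn1 h.1)]
          rw [(ih (i + 1) seq (by omega) (by omega)).2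
            s hs0 (by omega) (by simp)]
          rw [List.takeWhile_cons_of_pos (p := fun e => !((decide (e ≠ 0)).xor ci)) (l := y :: ys) hx,
            List.dropWhile_cons_of_pos (p := fun e => !((decide (e ≠ 0)).xor ci)) (l := y :: ys) hx]
          simp only [List.length_cons, Nat.cast_add, Nat.cast_one]
          have e1 : i + 1 + (((y :: ys).takeWhile fun e => !((decide (e ≠ 0)).xor ci)).length : Int) - s
              = i + ((((y :: ys).takeWhile fun e => !((decide (e ≠ 0)).xor ci)).length : Int) + 1) - s := by omega
          rw [e1]
    · -- x does not match
      refine ⟨?_, fun s hs0 hsi _ => ?_⟩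
      · rw [aGo_cons, if_neg hx]
        rw [if_neg (show ¬((0:Int) ≤ -1 ∧ t ≤ i - -1) from fun h => by omega)]
        rw [(ih (i + 1) seq (by omega) (by omega)).1]
        rw [altGo_cons, if_neg hx]
      · rw [aGo_cons, if_neg hx]
        rw [(ih (i + 1) (if 0 ≤ s ∧ t ≤ i - s then seq ++ [i - s] else seq)
          (by omega) (by omega)).1]
        rw [List.takeWhile_cons_of_neg (p := fun e => !((decide (e ≠ 0)).xor ci)) (l := xs) hx,
          List.dropWhile_cons_of_neg (p := fun e => !((decide (e ≠ 0)).xor ci)) (l := xs) hx,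
          altGo_cons, if_neg hx]
        simp only [List.length_nil, Nat.cast_zero, add_zero]
        split_ifs with h1 h2 h2 <;> first | rfl | (exfalso; omega)

-- ===== VERDICT (by name: the statement is the Claim_ definition above) =====
theorem conj_seq_lst_spec : Claim_equal_conj_seq_lst := by
  intro lst ci t _
  unfold Spec_conj_seq_lst conj_seq_lst conj_seq_lst_alt
  simpa using (aGo_eq_altGo ci t (lst.length : Int) lst 0 [] le_rfl (by simp)).1
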